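-- pv_equiv track=rewrite | github.com/UbiPLab/TiMTAPS | TiMTAPS/HTLP_MUL.py | MHP_PEval
-- ===== SOURCE A (Python) =====
-- def MHP_PEval(pp,Z_list):
--     l = len(Z_list)
--     t,N,g,h = pp
--     mo = N*N
--     u_hat = 1
--     v_hat = 1
--     for i in range(0,l):
--         u,v = Z_list[i]
--         u_hat = (u_hat*u)%N
--         v_hat = (v_hat*v)%mo
--     Z_hat = [u_hat,v_hat]
--     return Z_hat
-- ===== SOURCE B (Python) =====
-- def _prod(xs):
--     n = len(xs)
--     if n == 0:
--         return 1
--     if n == 1: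
--         return xs[0]
--     m = n // 2
--     return _prod(xs[:m]) * _prod(xs[m:])
--
-- def MHP_PEval(pp, Z_list):
--     t, N, g, h = pp
--     us = [u for u, _ in Z_list]
--     vs = [v for _, v in Z_list]
--     return [_prod(us) % N, _prod(vs) % (N * N)]
-- ===== Notes on version B (the rewrite author's own statement) =====
-- stated objective: alternative
-- what changed: Replaces the single fused per-step-mod loop by unzipping into u- and v-lists, computing each full product with a divide-and-conquer product tree, and reducing modulo N resp. N*N once at the end.
-- outside the precondition, e.g. on MHP_PEval((1, 0, 1, 1), []): A returns [1, 1], B raises ZeroDivisionError; on MHP_PEval((0, -2, 0, 0), []): A returns [1, 1], B returns [-1, 1]; on MHP_PEval((0, 1, 0, 0), []): A returns [1, 1], B returns [0, 0]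
import Mathlib
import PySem

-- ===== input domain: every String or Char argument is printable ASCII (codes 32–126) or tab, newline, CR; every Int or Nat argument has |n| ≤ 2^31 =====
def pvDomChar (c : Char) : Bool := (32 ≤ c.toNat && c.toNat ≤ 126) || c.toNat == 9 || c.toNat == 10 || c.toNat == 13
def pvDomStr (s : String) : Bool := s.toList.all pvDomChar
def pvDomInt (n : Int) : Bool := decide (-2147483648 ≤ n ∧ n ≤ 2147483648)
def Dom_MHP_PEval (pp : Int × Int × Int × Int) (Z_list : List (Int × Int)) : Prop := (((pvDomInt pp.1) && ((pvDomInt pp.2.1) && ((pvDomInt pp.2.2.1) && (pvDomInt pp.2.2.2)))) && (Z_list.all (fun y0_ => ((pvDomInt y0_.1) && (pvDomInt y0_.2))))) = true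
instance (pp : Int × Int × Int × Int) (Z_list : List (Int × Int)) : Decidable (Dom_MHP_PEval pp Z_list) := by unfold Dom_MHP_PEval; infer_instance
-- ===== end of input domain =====

-- B unzips Z_list and computes each full product with a divide-and-conquer product tree,
-- reducing modulo N resp. N*N only once at the end (alternative decomposition, not claimed faster).

-- ===== PORT A =====
def MHP_PEval (pp : Int × Int × Int × Int) (Z_list : List (Int × Int)) : List Int :=
  let l : Int := Z_list.length
  let N := pp.2.1
  let mo := N * N
  let st := (PySem.List.pyRange 0 l 1).foldl
    (fun (s : Int × Int) i =>
      let uv := PySem.List.pyGetD Z_list i (0, 0)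
      (PySem.Int.mod (s.1 * uv.1) N, PySem.Int.mod (s.2 * uv.2) mo))
    (1, 1)
  [st.1, st.2]

-- ===== PORT B =====
-- _prod from Source B: divide-and-conquer product of the whole list
-- (fuel = xs.length is only a structural-termination guard; it never changes the computation)
def pvProdGo : Nat → List Int → Int
  | 0, _ => 1
  | fuel + 1, xs =>
    if xs.length = 0 then 1
    else if xs.length = 1 then PySem.List.pyGetD xs 0 1
    else
      let m := xs.length / 2
      pvProdGo fuel (PySem.List.slice xs none (some (m : Int))) *
        pvProdGo fuel (PySem.List.slice xs (some (m : Int)) none)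

def pvProd (xs : List Int) : Int := pvProdGo xs.length xs

def MHP_PEval_alt (pp : Int × Int × Int × Int) (Z_list : List (Int × Int)) : List Int :=
  let N := pp.2.1
  let us := Z_list.map Prod.fst
  let vs := Z_list.map Prod.snd
  [PySem.Int.mod (pvProd us) N, PySem.Int.mod (pvProd vs) (N * N)]

-- ===== PRECONDITION & SPEC =====
-- Pre_ excludes N = 0 (A raises ZeroDivisionError on any nonempty Z_list, and B always raises there)
-- and the corner of an empty Z_list with N < 0 or N = 1, where A's unreduced initial 1 and B's
-- reduced 1 % N are equally defensible values for an empty modular product.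
def Pre_MHP_PEval (pp : Int × Int × Int × Int) (Z_list : List (Int × Int)) : Prop :=
  pp.2.1 ≠ 0 ∧ (Z_list ≠ [] ∨ 1 < pp.2.1)
instance (pp : Int × Int × Int × Int) (Z_list : List (Int × Int)) : Decidable (Pre_MHP_PEval pp Z_list) := by unfold Pre_MHP_PEval; infer_instance

def pvWitness_MHP_PEval : (Int × Int × Int × Int) × (List (Int × Int)) := ((0, 3, 0, 0), [(2, 5)])

def Spec_MHP_PEval (pp : Int × Int × Int × Int) (Z_list : List (Int × Int)) (out : List Int) : Prop := out = MHP_PEval_alt pp Z_list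
instance (pp : Int × Int × Int × Int) (Z_list : List (Int × Int)) (out : List Int) : Decidable (Spec_MHP_PEval pp Z_list out) := by unfold Spec_MHP_PEval; infer_instance

-- ===== CLAIM (what is proved, stated in full; the proofs are below) =====
def Claim_equal_MHP_PEval : Prop := ∀ (pp : Int × Int × Int × Int) (Z_list : List (Int × Int)), Dom_MHP_PEval pp Z_list → Pre_MHP_PEval pp Z_list → Spec_MHP_PEval pp Z_list (MHP_PEval pp Z_list)

-- ===== LEMMAS AND PROOFS =====

-- the product tree computes the list product
theorem pvProdGo_eq (fuel : Nat) : ∀ xs : List Int, xs.length ≤ fuel → pvProdGo fuel xs = xs.prod := by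
  induction fuel with
  | zero =>
    intro xs h
    rw [List.length_eq_zero_iff.mp (Nat.le_zero.mp h)]
    rfl
  | succ f ih =>
    intro xs h
    rw [pvProdGo]
    by_cases h0 : xs.length = 0
    · rw [List.length_eq_zero_iff.mp h0]
      simp
    · by_cases h1 : xs.length = 1
      · obtain ⟨x, hx⟩ := List.length_eq_one_iff.mp h1
        subst hx
        simp [PySem.List.pyGetD_zero_cons]
      · simp only [h0, h1, if_false]
        rw [PySem.List.slice_to_natCast, PySem.List.slice_from_natCast]
        rw [ih _ (by simp; omega), ih _ (by simp; omega)]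
        exact List.prod_take_mul_prod_drop xs _

theorem pvProd_eq (xs : List Int) : pvProd xs = xs.prod :=
  pvProdGo_eq xs.length xs le_rfl

-- Python mod respects congruence mod N
theorem pv_mod_congr (N x y : Int) (hN : N ≠ 0) (h : N ∣ x - y) :
    PySem.Int.mod x N = PySem.Int.mod y N := by
  have hx := PySem.Int.floordiv_mul_add_mod x N
  have hy := PySem.Int.floordiv_mul_add_mod y N
  have hdvd : N ∣ PySem.Int.mod x N - PySem.Int.mod y N := by
    have : PySem.Int.mod x N - PySem.Int.mod y N
        = (x - y) - (PySem.Int.floordiv x N - PySem.Int.floordiv y N) * N := by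
      rw [sub_mul]; linarith
    rw [this]
    exact dvd_sub h (dvd_mul_left N _)
  have habs : |PySem.Int.mod x N - PySem.Int.mod y N| < |N| := by
    rcases lt_or_gt_of_ne hN with hneg | hpos
    · have b1 := PySem.Int.mod_neg_bounds x hneg
      have b2 := PySem.Int.mod_neg_bounds y hneg
      rw [abs_of_neg hneg, abs_lt]; omega
    · have b1 := PySem.Int.mod_nonneg x hpos
      have b2 := PySem.Int.mod_lt x hpos
      have b3 := PySem.Int.mod_nonneg y hpos
      have b4 := PySem.Int.mod_lt y hpos
      rw [abs_of_pos hpos, abs_lt]; omega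
  have hz : PySem.Int.mod x N - PySem.Int.mod y N = 0 :=
    Int.eq_zero_of_abs_lt_dvd ((abs_dvd N _).mpr hdvd) habs
  omega

-- folding per-step reduction from a reduced accumulator equals one final reduction of the product
theorem pv_foldl_mod (N : Int) (hN : N ≠ 0) (xs : List Int) : ∀ a : Int,
    xs.foldl (fun s x => PySem.Int.mod (s * x) N) (PySem.Int.mod a N)
      = PySem.Int.mod (a * xs.prod) N := by
  induction xs with
  | nil => intro a; simp
  | cons x xs ih =>
    intro a
    have hstep : PySem.Int.mod (PySem.Int.mod a N * x) N = PySem.Int.mod (a * x) N := by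
      apply pv_mod_congr _ _ _ hN
      have : PySem.Int.mod a N * x - a * x = (PySem.Int.mod a N - a) * x := by ring
      rw [this]
      apply Dvd.dvd.mul_right
      have := PySem.Int.floordiv_mul_add_mod a N
      exact ⟨-(PySem.Int.floordiv a N), by linarith⟩
    simp only [List.foldl_cons, hstep, ih (a * x), List.prod_cons]
    ring_nf

theorem pv_mod_one_self (N : Int) (hN : 1 < N) : PySem.Int.mod 1 N = 1 := by
  rw [PySem.Int.mod_eq_emod_of_pos (show (0:Int) < N by omega)]
  exact Int.emod_eq_of_lt (by omega) hN

-- one component of A's fold equals B's reduced product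
theorem pv_component (N : Int) (hN : N ≠ 0) (xs : List Int) (hne : xs ≠ []) :
    xs.foldl (fun s x => PySem.Int.mod (s * x) N) 1 = PySem.Int.mod xs.prod N := by
  cases xs with
  | nil => exact absurd rfl hne
  | cons x xs =>
    simp only [List.foldl_cons, List.prod_cons]
    have h1 : PySem.Int.mod (1 * x) N = PySem.Int.mod x N := by norm_num
    rw [h1]
    have := pv_foldl_mod N hN xs x
    rw [this]

-- ===== VERDICT (by name: the statement is the Claim_ definition above) =====
theorem MHP_PEval_spec : Claim_equal_MHP_PEval := by
  intro pp Z_list _ hpre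
  obtain ⟨hN, hcase⟩ := hpre
  show MHP_PEval pp Z_list = MHP_PEval_alt pp Z_list
  simp only [MHP_PEval, MHP_PEval_alt]
  rw [PySem.List.foldl_pyRange_zero_pyGetD' Z_list (0, 0)
      (fun (s : Int × Int) (uv : Int × Int) =>
        (PySem.Int.mod (s.1 * uv.1) pp.2.1, PySem.Int.mod (s.2 * uv.2) (pp.2.1 * pp.2.1)))
      (1, 1)]
  rw [PySem.List.foldl_prod_mk
    (f := fun s (e : Int × Int) => PySem.Int.mod (s * e.1) pp.2.1)
    (g := fun s (e : Int × Int) => PySem.Int.mod (s * e.2) (pp.2.1 * pp.2.1))]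
  rw [pvProd_eq, pvProd_eq]
  have hmo : pp.2.1 * pp.2.1 ≠ 0 := mul_ne_zero hN hN
  cases Z_list with
  | nil =>
    have hN1 : 1 < pp.2.1 := by
      rcases hcase with h | h
      · exact absurd rfl h
      · exact h
    have hmo1 : 1 < pp.2.1 * pp.2.1 := by nlinarith
    simp [pv_mod_one_self _ hN1, pv_mod_one_self _ hmo1]
  | cons z zs =>
    have hu := pv_component pp.2.1 hN ((z :: zs).map Prod.fst) (by simp)
    have hv := pv_component (pp.2.1 * pp.2.1) hmo ((z :: zs).map Prod.snd) (by simp)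
    rw [List.foldl_map] at hu hv
    simp [hu, hv]
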